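-- pv_equiv track=rewrite | github.com/hydrocomputing/rtmf6 | src/rtmf6/preprocessing/adjust_prefixes.py | prefix_file_paths
-- ===== SOURCE A (Python) =====
-- def prefix_file_paths(
--     in_text,
--     blocks,
--     skip_model_types=None,
--     skip_file_names=None,
--     prefix='../../../mf6/',
-- ):
--     """Prefix path to files."""
--     if skip_file_names is None:
--         skip_file_names = []
--     skip_file_names = set(skip_file_names)
--     skipped = {}
--     if skip_model_types:
--         skip_model_types = [entry.lower() for entry in skip_model_types]
--     out = []
--     in_block = False
--     for line in in_text.splitlines():
--         processed_line = line.strip().lower()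
--         if processed_line.startswith('begin'):
--             if processed_line.split()[1] in blocks:
--                 in_block = True
--                 out.append(line)
--                 continue
--         if processed_line.startswith('end'):
--             if processed_line.split()[1] in blocks:
--                 in_block = False
--         if in_block:
--             entry_type, file_name, *_ = line.split()
--             if file_name in skip_file_names:
--                 modified_line = line
--             else:
--                 key = entry_type.lower()
--                 if skip_model_types and key in skip_model_types:
--                     modified_line = line
--                     skipped.setdefault(key, []).append(file_name)
--                 else:
--                     modified_line = line.replace(file_name, prefix + file_name)
--             out.append(modified_line)
--         else:
--             out.append(line)
--     return skipped, '\n'.join(out)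
-- ===== SOURCE B (Python) =====
-- def prefix_file_paths(
--     in_text,
--     blocks,
--     skip_model_types=None,
--     skip_file_names=None,
--     prefix='../../../mf6/',
-- ):
--     """Prefix path to files (two-pass: mark block structure, then rewrite)."""
--     lines = in_text.splitlines()
--     # Pass 1: per line, None = matched begin header (verbatim), True = inside
--     # a block (rewrite), False = outside (verbatim).
--     marks = []
--     inside = False
--     for line in lines:
--         p = line.strip().lower()
--         if p.startswith('begin'):
--             if p.split()[1] in blocks:
--                 inside = True
--                 marks.append(None)
--                 continue
--         if p.startswith('end') and p.split()[1] in blocks: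
--             inside = False
--         marks.append(inside)
--     # Pass 2: rewrite the marked lines.
--     skip_names = set(skip_file_names or [])
--     skip_types = [t.lower() for t in skip_model_types] if skip_model_types else None
--     skipped = {}
--     out = []
--     for line, mark in zip(lines, marks):
--         if mark is not True:
--             out.append(line)
--             continue
--         entry_type, file_name, *_ = line.split()
--         if file_name in skip_names:
--             out.append(line)
--         else:
--             key = entry_type.lower()
--             if skip_types and key in skip_types:
--                 skipped.setdefault(key, []).append(file_name)
--                 out.append(line)
--             else:
--                 out.append(line.replace(file_name, prefix + file_name))
--     return skipped, '\n'.join(out)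
-- ===== Notes on version B (the rewrite author's own statement) =====
-- stated objective: alternative
-- what changed: B separates A's single stateful loop into two passes: a first scan computes a per-line mark (begin-header / inside-block / outside) from the block state machine alone, and a second pass rewrites lines from (line, mark) pairs, so block tracking and line rewriting are decoupled.
import Mathlib
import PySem

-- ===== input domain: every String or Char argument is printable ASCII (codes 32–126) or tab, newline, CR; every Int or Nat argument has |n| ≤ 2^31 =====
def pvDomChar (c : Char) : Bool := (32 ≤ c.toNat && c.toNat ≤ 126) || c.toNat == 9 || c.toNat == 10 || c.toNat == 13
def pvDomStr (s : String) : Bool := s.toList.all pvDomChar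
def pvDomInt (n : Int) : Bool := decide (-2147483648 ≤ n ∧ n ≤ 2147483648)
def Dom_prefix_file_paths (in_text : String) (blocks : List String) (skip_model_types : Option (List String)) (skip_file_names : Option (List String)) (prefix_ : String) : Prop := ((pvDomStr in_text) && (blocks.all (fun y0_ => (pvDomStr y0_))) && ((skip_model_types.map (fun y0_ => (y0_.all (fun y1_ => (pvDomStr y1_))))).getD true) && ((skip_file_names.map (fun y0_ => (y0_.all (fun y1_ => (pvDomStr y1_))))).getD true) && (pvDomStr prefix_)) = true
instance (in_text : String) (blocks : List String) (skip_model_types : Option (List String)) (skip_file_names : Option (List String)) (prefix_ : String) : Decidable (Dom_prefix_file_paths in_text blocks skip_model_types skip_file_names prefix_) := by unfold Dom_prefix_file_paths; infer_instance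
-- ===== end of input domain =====

-- B replaces A's single stateful loop by two passes (mark the block structure, then rewrite the marked lines); same cost, different decomposition. Equivalence is about the return value.


-- ===== PORT A =====
-- body of A's 'if in_block:' branch for one line; none = ValueError from
-- 'entry_type, file_name, *_ = line.split()'
def pvInner (sfn : PySem.Set String) (smt : List String) (prefix_ : String)
    (skipped : PySem.Dict String (List String)) (line : String) :
    Option (PySem.Dict String (List String) × String) :=
  match PySem.List.pyGet? (PySem.Str.split₀ line) 0, PySem.List.pyGet? (PySem.Str.split₀ line) 1 with
  | some entry_type, some file_name =>
    if PySem.Set.contains sfn file_name then some (skipped, line)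
    else
      let key := PySem.Str.lower entry_type
      if (!smt.isEmpty) && smt.contains key then
        some (skipped.modify key [] (fun l => l ++ [file_name]), line)
      else
        some (skipped, PySem.Str.replace line file_name (prefix_ ++ file_name))
  | _, _ => none

-- the 'if in_block:' part of A's loop body (ib = the possibly updated in_block)
def pvDoBody (sfn : PySem.Set String) (smt : List String) (prefix_ : String)
    (skipped : PySem.Dict String (List String)) (out : List String) (line : String) (ib : Bool) :
    Option (PySem.Dict String (List String) × List String × Bool) :=
  if ib then
    match pvInner sfn smt prefix_ skipped line with
    | none => none
    | some (sk', modified_line) => some (sk', out ++ [modified_line], ib)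
  else some (skipped, out ++ [line], ib)

-- the loop body after the 'begin' check fell through ('end' check, then in_block handling)
def pvABody (blocks : List String) (sfn : PySem.Set String) (smt : List String) (prefix_ : String)
    (skipped : PySem.Dict String (List String)) (out : List String) (in_block : Bool) (line : String) :
    Option (PySem.Dict String (List String) × List String × Bool) :=
  if PySem.Str.startswith (PySem.Str.lower (PySem.Str.strip line)) "end" then
    match PySem.List.pyGet? (PySem.Str.split₀ (PySem.Str.lower (PySem.Str.strip line))) 1 with
    | none => none
    | some t => pvDoBody sfn smt prefix_ skipped out line (if blocks.contains t then false else in_block)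
  else pvDoBody sfn smt prefix_ skipped out line in_block

-- one iteration of A's loop (none = an exception was raised on an earlier line)
def pvAStep (blocks : List String) (sfn : PySem.Set String) (smt : List String) (prefix_ : String)
    (st : Option (PySem.Dict String (List String) × List String × Bool)) (line : String) :
    Option (PySem.Dict String (List String) × List String × Bool) :=
  match st with
  | none => none
  | some (skipped, out, in_block) =>
    let processed := PySem.Str.lower (PySem.Str.strip line)
    if PySem.Str.startswith processed "begin" then
      match PySem.List.pyGet? (PySem.Str.split₀ processed) 1 with
      | none => none
      | some t =>
        if blocks.contains t then some (skipped, out ++ [line], true)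
        else pvABody blocks sfn smt prefix_ skipped out in_block line
    else pvABody blocks sfn smt prefix_ skipped out in_block line

def prefix_file_paths (in_text : String) (blocks : List String) (skip_model_types : Option (List String)) (skip_file_names : Option (List String)) (prefix_ : String) : (List (String × List String)) × String :=
  let sfn : PySem.Set String := PySem.Set.ofList (skip_file_names.getD [])
  let smt : List String :=
    match skip_model_types with
    | none => []
    | some l => if l.isEmpty then l else l.map PySem.Str.lower
  match (PySem.Str.splitlines in_text).foldl (pvAStep blocks sfn smt prefix_)
      (some (PySem.Dict.empty, [], false)) with
  | some (skipped, out, _) => (skipped.items, PySem.Str.join "\n" out)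
  | none => ([], "")   -- A raises here; excluded by Pre_

-- ===== PORT B =====
-- pass 1, tail of the loop body after the 'begin' check fell through
-- record the (possibly updated) inside flag as this line's mark and the next state
def pvMk (b : Bool) : Option (Option Bool × Bool) := some (some b, b)

def pvMarkTail (blocks : List String) (inside : Bool) (line : String) : Option (Option Bool × Bool) :=
  if PySem.Str.startswith (PySem.Str.lower (PySem.Str.strip line)) "end" then
    match PySem.List.pyGet? (PySem.Str.split₀ (PySem.Str.lower (PySem.Str.strip line))) 1 with
    | none => none
    | some t => pvMk (if blocks.contains t then false else inside)
  else pvMk inside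

-- pass 1, one line: its mark (none = matched begin header, some b = inside/outside) and the next state
def pvMarkStep (blocks : List String) (inside : Bool) (line : String) : Option (Option Bool × Bool) :=
  let p := PySem.Str.lower (PySem.Str.strip line)
  if PySem.Str.startswith p "begin" then
    match PySem.List.pyGet? (PySem.Str.split₀ p) 1 with
    | none => none
    | some t => if blocks.contains t then some (none, true) else pvMarkTail blocks inside line
  else pvMarkTail blocks inside line

-- pass 1: the mark list
def pvMarks (blocks : List String) : Bool → List String → Option (List (Option Bool))
  | _, [] => some []
  | inside, line :: rest =>
    match pvMarkStep blocks inside line with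
    | none => none
    | some (m, inside') => (pvMarks blocks inside' rest).map (fun ms => m :: ms)

-- pass 2, one (line, mark) pair
def pvBStep (sfn : PySem.Set String) (smtB : Option (List String)) (prefix_ : String)
    (st : Option (PySem.Dict String (List String) × List String)) (p : String × Option Bool) :
    Option (PySem.Dict String (List String) × List String) :=
  match st with
  | none => none
  | some (skipped, out) =>
    match p.2 with
    | some true =>
      match PySem.List.pyGet? (PySem.Str.split₀ p.1) 0, PySem.List.pyGet? (PySem.Str.split₀ p.1) 1 with
      | some entry_type, some file_name =>
        if PySem.Set.contains sfn file_name then some (skipped, out ++ [p.1])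
        else
          let key := PySem.Str.lower entry_type
          if (match smtB with | some l => l.contains key | none => false) then
            some (skipped.modify key [] (fun l => l ++ [file_name]), out ++ [p.1])
          else
            some (skipped, out ++ [PySem.Str.replace p.1 file_name (prefix_ ++ file_name)])
      | _, _ => none
    | _ => some (skipped, out ++ [p.1])

def prefix_file_paths_alt (in_text : String) (blocks : List String) (skip_model_types : Option (List String)) (skip_file_names : Option (List String)) (prefix_ : String) : (List (String × List String)) × String :=
  let lines := PySem.Str.splitlines in_text
  let sfn : PySem.Set String := PySem.Set.ofList (skip_file_names.getD [])
  let smtB : Option (List String) :=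
    match skip_model_types with
    | none => none
    | some l => if l.isEmpty then none else some (l.map PySem.Str.lower)
  match pvMarks blocks false lines with
  | none => ([], "")   -- B raises in pass 1; excluded by Pre_
  | some marks =>
    match (lines.zip marks).foldl (pvBStep sfn smtB prefix_) (some (PySem.Dict.empty, [])) with
    | some (skipped, out) => (skipped.items, PySem.Str.join "\n" out)
    | none => ([], "")   -- B raises in pass 2; excluded by Pre_

-- ===== PRECONDITION & SPEC =====
-- Pre_ excludes exactly the inputs on which Python A raises: an IndexError on a
-- begin/end header line with fewer than two tokens, or a ValueError on a line
-- inside a selected block with fewer than two tokens.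
def pvLineOk (blocks : List String) (ib : Bool) (line : String) : Bool × Bool :=
  let p := PySem.Str.lower (PySem.Str.strip line)
  let pt := PySem.Str.split₀ p
  let bodyOk : Bool := !ib || decide (2 ≤ (PySem.Str.split₀ line).length)
  if PySem.Str.startswith p "begin" then
    if h2 : 2 ≤ pt.length then
      (if pt[1] ∈ blocks then (true, true) else (bodyOk, ib))
    else (false, ib)
  else if PySem.Str.startswith p "end" then
    if h2 : 2 ≤ pt.length then
      (if pt[1] ∈ blocks then (true, false) else (bodyOk, ib))
    else (false, ib)
  else (bodyOk, ib)

def Pre_prefix_file_paths (in_text : String) (blocks : List String) (skip_model_types : Option (List String)) (skip_file_names : Option (List String)) (prefix_ : String) : Prop :=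
  ((PySem.Str.splitlines in_text).foldl
    (fun (st : Bool × Bool) line =>
      let r := pvLineOk blocks st.2 line
      (st.1 && r.1, r.2)) (true, false)).1 = true
instance (in_text : String) (blocks : List String) (skip_model_types : Option (List String)) (skip_file_names : Option (List String)) (prefix_ : String) : Decidable (Pre_prefix_file_paths in_text blocks skip_model_types skip_file_names prefix_) := by unfold Pre_prefix_file_paths; infer_instance

def pvWitness_prefix_file_paths : String × List String × Option (List String) × Option (List String) × String :=
  ("begin options\nghb6 a.dat\nend options\ntail", ["options"], some ["ghb6"], none, "p/")

def Spec_prefix_file_paths (in_text : String) (blocks : List String) (skip_model_types : Option (List String)) (skip_file_names : Option (List String)) (prefix_ : String) (out : (List (String × List String)) × String) : Prop := out = prefix_file_paths_alt in_text blocks skip_model_types skip_file_names prefix_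
instance (in_text : String) (blocks : List String) (skip_model_types : Option (List String)) (skip_file_names : Option (List String)) (prefix_ : String) (out : (List (String × List String)) × String) : Decidable (Spec_prefix_file_paths in_text blocks skip_model_types skip_file_names prefix_ out) := by unfold Spec_prefix_file_paths; infer_instance

-- ===== CLAIM (what is proved, stated in full; the proofs are below) =====
def Claim_equal_prefix_file_paths : Prop := ∀ (in_text : String) (blocks : List String) (skip_model_types : Option (List String)) (skip_file_names : Option (List String)) (prefix_ : String), Dom_prefix_file_paths in_text blocks skip_model_types skip_file_names prefix_ → Pre_prefix_file_paths in_text blocks skip_model_types skip_file_names prefix_ → Spec_prefix_file_paths in_text blocks skip_model_types skip_file_names prefix_ (prefix_file_paths in_text blocks skip_model_types skip_file_names prefix_)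

-- ===== LEMMAS AND PROOFS =====

theorem foldA_none (blocks : List String) (sfn : PySem.Set String) (smt : List String) (prefix_ : String) (lines : List String) :
    lines.foldl (pvAStep blocks sfn smt prefix_) none = none := by
  induction lines with
  | nil => rfl
  | cons l t ih => simpa [pvAStep] using ih

theorem foldB_none (sfn : PySem.Set String) (smtB : Option (List String)) (prefix_ : String) (ps : List (String × Option Bool)) :
    ps.foldl (pvBStep sfn smtB prefix_) none = none := by
  induction ps with
  | nil => rfl
  | cons l t ih => simpa [pvBStep] using ih

-- pass 2 on an inside-marked line computes exactly A's in-block body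
theorem pvStepInner (sfn : PySem.Set String) (smt : List String) (smtB : Option (List String)) (prefix_ : String)
    (hsm : ∀ key : String, ((!smt.isEmpty) && smt.contains key)
        = (match smtB with | some l => l.contains key | none => false))
    (sk : PySem.Dict String (List String)) (out : List String) (line : String) :
    pvBStep sfn smtB prefix_ (some (sk, out)) (line, some true)
      = (pvInner sfn smt prefix_ sk line).map (fun r => (r.1, out ++ [r.2])) := by
  simp only [pvBStep, pvInner]
  cases PySem.List.pyGet? (PySem.Str.split₀ line) 0 with
  | none => rfl
  | some et =>
    cases PySem.List.pyGet? (PySem.Str.split₀ line) 1 with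
    | none => rfl
    | some fn =>
      simp only [← hsm]
      split_ifs <;> simp

-- fall-through tail: A's remaining loop body vs B's pass-1 tail + pass 2
set_option maxHeartbeats 1000000 in
theorem pvTail (blocks : List String) (sfn : PySem.Set String) (smt : List String)
    (smtB : Option (List String)) (prefix_ : String)
    (hsm : ∀ key : String, ((!smt.isEmpty) && smt.contains key)
        = (match smtB with | some l => l.contains key | none => false))
    (line : String) (rest : List String)
    (ih : ∀ (inside : Bool) (sk : PySem.Dict String (List String)) (out : List String),
      (rest.foldl (pvAStep blocks sfn smt prefix_) (some (sk, out, inside))).map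
          (fun r => (r.1, r.2.1))
      = (pvMarks blocks inside rest).bind
          (fun ms => (rest.zip ms).foldl (pvBStep sfn smtB prefix_) (some (sk, out))))
    (inside : Bool) (sk : PySem.Dict String (List String)) (out : List String) :
    (rest.foldl (pvAStep blocks sfn smt prefix_)
        (pvABody blocks sfn smt prefix_ sk out inside line)).map (fun r => (r.1, r.2.1))
    = (pvMarkTail blocks inside line).bind
        (fun mi => (pvMarks blocks mi.2 rest).bind
          (fun ms => (((line, mi.1) :: rest.zip ms)).foldl (pvBStep sfn smtB prefix_) (some (sk, out)))) := by
  have doBody : ∀ ib : Bool,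
      (rest.foldl (pvAStep blocks sfn smt prefix_)
        (pvDoBody sfn smt prefix_ sk out line ib)).map (fun r => (r.1, r.2.1))
      = (pvMk ib).bind
        (fun mi => (pvMarks blocks mi.2 rest).bind
          (fun ms => (((line, mi.1) :: rest.zip ms)).foldl (pvBStep sfn smtB prefix_) (some (sk, out)))) := by
    intro ib
    simp only [pvMk, Option.bind_some, List.foldl_cons]
    cases ib with
    | false =>
      rw [pvDoBody, if_neg (by simp), ih false sk (out ++ [line])]
      rfl
    | true =>
      rw [pvDoBody, if_pos rfl]
      have hstep := pvStepInner sfn smt smtB prefix_ hsm sk out line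
      rw [hstep]
      cases hinner : pvInner sfn smt prefix_ sk line with
      | none =>
        rw [foldA_none]
        simp only [Option.map_none, foldB_none]
        cases pvMarks blocks true rest with
        | none => rfl
        | some ms => rfl
      | some r =>
        obtain ⟨sk', ml⟩ := r
        simp only [Option.map_some]
        rw [ih true sk' (out ++ [ml])]
  rw [pvABody, pvMarkTail]
  cases he : PySem.Str.startswith (PySem.Str.lower (PySem.Str.strip line)) "end" with
  | true =>
    rw [if_pos rfl, if_pos rfl]
    cases PySem.List.pyGet? (PySem.Str.split₀ (PySem.Str.lower (PySem.Str.strip line))) 1 with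
    | none => simp [foldA_none]
    | some t => dsimp only; exact doBody (if blocks.contains t then false else inside)
  | false =>
    rw [if_neg (by simp), if_neg (by simp)]
    exact doBody inside

-- the heart: A's fold from any state equals B's pass 1 + pass 2 from the matching state
set_option maxHeartbeats 1000000 in
theorem pvMain (blocks : List String) (sfn : PySem.Set String) (smt : List String)
    (smtB : Option (List String)) (prefix_ : String)
    (hsm : ∀ key : String, ((!smt.isEmpty) && smt.contains key)
        = (match smtB with | some l => l.contains key | none => false))
    (lines : List String) :
    ∀ (inside : Bool) (sk : PySem.Dict String (List String)) (out : List String),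
    (lines.foldl (pvAStep blocks sfn smt prefix_) (some (sk, out, inside))).map
        (fun r => (r.1, r.2.1))
    = (pvMarks blocks inside lines).bind
        (fun ms => (lines.zip ms).foldl (pvBStep sfn smtB prefix_) (some (sk, out))) := by
  induction lines with
  | nil => intro inside sk out; simp [pvMarks]
  | cons line rest ih =>
    intro inside sk out
    have hfall :
        (rest.foldl (pvAStep blocks sfn smt prefix_)
            (pvABody blocks sfn smt prefix_ sk out inside line)).map (fun r => (r.1, r.2.1))
        = ((pvMarkTail blocks inside line).bind
            (fun mi => (pvMarks blocks mi.2 rest).map (fun ms => mi.1 :: ms))).bind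
            (fun ms => ((line :: rest).zip ms).foldl (pvBStep sfn smtB prefix_) (some (sk, out))) := by
      rw [pvTail blocks sfn smt smtB prefix_ hsm line rest ih inside sk out]
      cases pvMarkTail blocks inside line with
      | none => rfl
      | some mi =>
        simp only [Option.bind_some]
        cases pvMarks blocks mi.2 rest with
        | none => rfl
        | some ms => simp [List.zip_cons_cons]
    rw [List.foldl_cons, pvAStep, pvMarks, pvMarkStep]
    cases hb : PySem.Str.startswith (PySem.Str.lower (PySem.Str.strip line)) "begin" with
    | true =>
      rw [if_pos rfl, if_pos rfl]
      cases PySem.List.pyGet? (PySem.Str.split₀ (PySem.Str.lower (PySem.Str.strip line))) 1 with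
      | none => simp [foldA_none]
      | some t =>
        dsimp only
        cases hm : blocks.contains t with
        | true =>
          rw [if_pos rfl, if_pos rfl]
          rw [ih true sk (out ++ [line])]
          dsimp only
          cases pvMarks blocks true rest with
          | none => rfl
          | some ms => simp [List.zip_cons_cons, List.foldl_cons, pvBStep]
        | false =>
          rw [if_neg (by simp), if_neg (by simp)]
          rw [hfall]
          cases pvMarkTail blocks inside line with
          | none => rfl
          | some mi => rfl
    | false =>
      rw [if_neg (by simp), if_neg (by simp)]
      rw [hfall]
      cases pvMarkTail blocks inside line with
      | none => rfl
      | some mi => rfl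

-- the smt truthiness encodings of the two ports agree
theorem pvSmtAgree (skip_model_types : Option (List String)) (key : String) :
    ((!(match skip_model_types with
        | none => ([] : List String)
        | some l => if l.isEmpty then l else l.map PySem.Str.lower).isEmpty)
      && (match skip_model_types with
        | none => ([] : List String)
        | some l => if l.isEmpty then l else l.map PySem.Str.lower).contains key)
    = (match (match skip_model_types with
        | none => (none : Option (List String))
        | some l => if l.isEmpty then none else some (l.map PySem.Str.lower)) with
      | some l => l.contains key | none => false) := by
  cases skip_model_types with
  | none => rfl
  | some l => cases l with
    | nil => rfl
    | cons a t => simp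

-- top-level assembly on an arbitrary line list
theorem pvTop (blocks : List String) (sfn : PySem.Set String) (smt : List String)
    (smtB : Option (List String)) (prefix_ : String)
    (hsm : ∀ key : String, ((!smt.isEmpty) && smt.contains key)
        = (match smtB with | some l => l.contains key | none => false))
    (lines : List String) :
    (match lines.foldl (pvAStep blocks sfn smt prefix_) (some (PySem.Dict.empty, [], false)) with
      | some (skipped, out, _) => (skipped.items, PySem.Str.join "\n" out)
      | none => (([] : List (String × List String)), ""))
    = (match pvMarks blocks false lines with
      | none => (([] : List (String × List String)), "")
      | some marks =>
        match (lines.zip marks).foldl (pvBStep sfn smtB prefix_) (some (PySem.Dict.empty, [])) with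
        | some (skipped, out) => (skipped.items, PySem.Str.join "\n" out)
        | none => (([] : List (String × List String)), "")) := by
  have h := pvMain blocks sfn smt smtB prefix_ hsm lines false PySem.Dict.empty []
  cases hms : pvMarks blocks false lines with
  | none =>
    rw [hms] at h
    simp only [Option.bind_none] at h
    cases hfa : lines.foldl (pvAStep blocks sfn smt prefix_) (some (PySem.Dict.empty, [], false)) with
    | none => rfl
    | some r => rw [hfa] at h; simp at h
  | some ms =>
    rw [hms] at h
    simp only [Option.bind_some] at h
    cases hfb : (lines.zip ms).foldl (pvBStep sfn smtB prefix_) (some (PySem.Dict.empty, [])) with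
    | none =>
      rw [hfb] at h
      cases hfa : lines.foldl (pvAStep blocks sfn smt prefix_) (some (PySem.Dict.empty, [], false)) with
      | none => simp [hfb]
      | some r => rw [hfa] at h; simp at h
    | some r =>
      rw [hfb] at h
      cases hfa : lines.foldl (pvAStep blocks sfn smt prefix_) (some (PySem.Dict.empty, [], false)) with
      | none => rw [hfa] at h; simp at h
      | some ra =>
        rw [hfa] at h
        obtain ⟨sk, o, ib⟩ := ra
        obtain ⟨skb, ob⟩ := r
        simp only [Option.map_some, Option.some.injEq, Prod.mk.injEq] at h
        simp [hfb, h.1, h.2]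

-- ===== VERDICT (by name: the statement is the Claim_ definition above) =====
theorem prefix_file_paths_spec : Claim_equal_prefix_file_paths := by
  intro in_text blocks skip_model_types skip_file_names prefix_ _hdom _hpre
  clear _hdom _hpre
  exact pvTop blocks (PySem.Set.ofList (skip_file_names.getD []))
    (match skip_model_types with
      | none => []
      | some l => if l.isEmpty then l else l.map PySem.Str.lower)
    (match skip_model_types with
      | none => none
      | some l => if l.isEmpty then none else some (l.map PySem.Str.lower))
    prefix_ (fun key => pvSmtAgree skip_model_types key)
    (PySem.Str.splitlines in_text)
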